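-- pv_equiv track=rewrite | github.com/je488/Algorithm-Study | 백준/BOJ_20327.py | op6
-- ===== SOURCE A (Python) =====
-- def op6(a, l):
--     n = len(a)
--     ans = [[0] * n for _ in range(n)]
--     sub_size = (1 << l)
--     sub_count = n // sub_size
--     for i in range(sub_count):
--         for j in range(sub_count):
--             x1 = i * sub_size
--             y1 = j * sub_size
--             x2 = i * sub_size
--             y2 = (sub_count-j-1) * sub_size
--             for x in range(sub_size):
--                 for y in range(sub_size):
--                     ans[x1+x][y1+y] = a[x2+x][y2+y]
--     return ans
-- ===== SOURCE B (Python) =====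
-- def op6(a, l):
--     n = len(a)
--     sub_size = 1 << l
--     sub_count = n // sub_size
--     filled = sub_count * sub_size
--     perm = [(sub_count - 1 - c // sub_size) * sub_size + c % sub_size
--             for c in range(filled)]
--     pad = [0] * (n - filled)
--     return [[a[r][p] for p in perm] + pad for r in range(filled)] \
--         + [[0] * n for _ in range(n - filled)]
-- ===== Notes on version B (the rewrite author's own statement) =====
-- stated objective: simpler
-- what changed: Replaces the four nested block loops that write cells one by one into a preallocated matrix with a precomputed column-permutation table applied once per row by a comprehension (plus zero padding), so no mutation and no block-index bookkeeping remain.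
import Mathlib
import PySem

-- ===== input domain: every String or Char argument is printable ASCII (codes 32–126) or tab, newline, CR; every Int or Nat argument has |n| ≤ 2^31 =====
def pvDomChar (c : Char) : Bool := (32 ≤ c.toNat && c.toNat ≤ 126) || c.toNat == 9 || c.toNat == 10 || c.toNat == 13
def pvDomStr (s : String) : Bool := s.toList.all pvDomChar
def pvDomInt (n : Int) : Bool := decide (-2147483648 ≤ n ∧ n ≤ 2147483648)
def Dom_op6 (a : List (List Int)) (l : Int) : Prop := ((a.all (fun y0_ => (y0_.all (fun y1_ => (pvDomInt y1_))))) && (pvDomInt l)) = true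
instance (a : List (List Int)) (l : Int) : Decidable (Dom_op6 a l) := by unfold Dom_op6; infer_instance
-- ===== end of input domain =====

-- B replaces A's four nested block-copy loops over a preallocated mutable matrix by a
-- precomputed column-permutation table applied per row (objective: simpler decomposition).


-- ===== PORT A =====
def op6 (a : List (List Int)) (l : Int) : List (List Int) :=
  let n : Int := PySem.List.len a
  let ans : List (List Int) := List.replicate a.length (List.replicate a.length (0 : Int))
  let subSize : Int := 1 <<< l.toNat
  let subCount : Int := PySem.Int.floordiv n subSize
  (PySem.List.pyRange 0 subCount 1).foldl (fun ans i =>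
    (PySem.List.pyRange 0 subCount 1).foldl (fun ans j =>
      let x1 := i * subSize
      let y1 := j * subSize
      let x2 := i * subSize
      let y2 := (subCount - j - 1) * subSize
      (PySem.List.pyRange 0 subSize 1).foldl (fun ans x =>
        (PySem.List.pyRange 0 subSize 1).foldl (fun ans y =>
          PySem.List.pySetD ans (x1 + x)
            (PySem.List.pySetD (PySem.List.pyGetD ans (x1 + x) [])
              (y1 + y)
              (PySem.List.pyGetD (PySem.List.pyGetD a (x2 + x) []) (y2 + y) 0)))
        ans) ans) ans) ans

-- ===== PORT B =====
def op6_alt (a : List (List Int)) (l : Int) : List (List Int) :=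
  let n : Int := PySem.List.len a
  let subSize : Int := 1 <<< l.toNat
  let subCount : Int := PySem.Int.floordiv n subSize
  let filled : Int := subCount * subSize
  let perm : List Int := (PySem.List.pyRange 0 filled 1).map (fun c =>
    (subCount - 1 - PySem.Int.floordiv c subSize) * subSize + PySem.Int.mod c subSize)
  let pad : List Int := List.replicate (n - filled).toNat (0 : Int)
  ((PySem.List.pyRange 0 filled 1).map (fun r =>
      perm.map (fun p => PySem.List.pyGetD (PySem.List.pyGetD a r []) p 0) ++ pad))
    ++ List.replicate (n - filled).toNat (List.replicate n.toNat (0 : Int))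

-- ===== PRECONDITION & SPEC =====
-- Pre_ excludes exactly the inputs where the Python A raises: negative l (ValueError on 1 << l)
-- and matrices whose first `filled` rows are shorter than `filled` columns (IndexError on a[x2+x][y2+y]).
def Pre_op6 (a : List (List Int)) (l : Int) : Prop :=
  0 ≤ l ∧ ∀ row ∈ a.take (a.length / (1 <<< l.toNat) * (1 <<< l.toNat)),
    a.length / (1 <<< l.toNat) * (1 <<< l.toNat) ≤ row.length
instance (a : List (List Int)) (l : Int) : Decidable (Pre_op6 a l) := by unfold Pre_op6; infer_instance
def pvWitness_op6 : List (List Int) × Int := ([[1, 2], [3, 4]], 1)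

def Spec_op6 (a : List (List Int)) (l : Int) (out : List (List Int)) : Prop := out = op6_alt a l
instance (a : List (List Int)) (l : Int) (out : List (List Int)) : Decidable (Spec_op6 a l out) := by unfold Spec_op6; infer_instance

-- ===== CLAIM (what is proved, stated in full; the proofs are below) =====
def Claim_equal_op6 : Prop := ∀ (a : List (List Int)) (l : Int), Dom_op6 a l → Pre_op6 a l → Spec_op6 a l (op6 a l)

-- ===== LEMMAS AND PROOFS =====
def set2 (g : List (List Int)) (p q : Nat) (v : Int) : List (List Int) :=
  g.set p ((g.getD p []).set q v)

def cell (g : List (List Int)) (r c : Nat) : Int := (g.getD r []).getD c 0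

def wstep (g : List (List Int)) (t : Nat × Nat × Int) : List (List Int) :=
  set2 g t.1 t.2.1 t.2.2

def writes (a : List (List Int)) (sc s : Nat) : List (Nat × Nat × Int) :=
  (List.range sc).flatMap fun i => (List.range sc).flatMap fun j =>
    (List.range s).flatMap fun x => (List.range s).map fun y =>
      (i*s+x, (j*s+y, (a.getD (i*s+x) []).getD ((sc-1-j)*s+y) 0))

def grid0 (n : Nat) : List (List Int) := List.replicate n (List.replicate n (0 : Int))

def bgrid (a : List (List Int)) (sc s : Nat) : List (List Int) :=
  (List.range (sc*s)).map (fun r =>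
      (List.range (sc*s)).map (fun c => (a.getD r []).getD ((sc-1-c/s)*s + c%s) 0)
        ++ List.replicate (a.length - sc*s) (0 : Int))
    ++ List.replicate (a.length - sc*s) (List.replicate a.length (0 : Int))

lemma length_set2 (g : List (List Int)) (p q : Nat) (v : Int) :
    (set2 g p q v).length = g.length := by simp [set2]

lemma getD_set2 (g : List (List Int)) (p q : Nat) (v : Int) (r : Nat) :
    (set2 g p q v).getD r [] =
      if p = r ∧ r < g.length then (g.getD r []).set q v else g.getD r [] := by
  simp only [set2, List.getD_eq_getElem?_getD, List.getElem?_set]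
  split_ifs with h1 h2 h3 h3 <;> simp_all

lemma rowlen_set2 (g : List (List Int)) (p q : Nat) (v : Int) (r : Nat) :
    ((set2 g p q v).getD r []).length = (g.getD r []).length := by
  rw [getD_set2]; split_ifs <;> simp

lemma cell_set2 (g : List (List Int)) (p q : Nat) (v : Int) (r c : Nat) :
    cell (set2 g p q v) r c =
      if p = r ∧ q = c ∧ r < g.length ∧ c < (g.getD r []).length then v
      else cell g r c := by
  unfold cell
  rw [getD_set2]
  by_cases h1 : p = r ∧ r < g.length
  · rw [if_pos h1]
    obtain ⟨hpr, hrlen⟩ := h1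
    simp only [List.getD_eq_getElem?_getD, List.getElem?_set]
    by_cases hqc : q = c
    · subst hqc
      by_cases hql : q < (g.getD r []).length
      · rw [if_pos rfl, if_pos (by simpa [List.getD_eq_getElem?_getD] using hql),
          if_pos ⟨hpr, rfl, hrlen, hql⟩]
        rfl
      · rw [if_pos rfl, if_neg (by simpa [List.getD_eq_getElem?_getD] using hql),
          if_neg (by tauto)]
        simp only [Option.getD_none]
        rw [List.getElem?_eq_none (by simpa [List.getD_eq_getElem?_getD] using hql)]
        rfl
    · rw [if_neg hqc, if_neg (by tauto)]
  · rw [if_neg h1, if_neg (by tauto)]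

lemma length_foldl_wstep (L : List (Nat × Nat × Int)) (g : List (List Int)) :
    (L.foldl wstep g).length = g.length := by
  induction L generalizing g with
  | nil => rfl
  | cons t L ih => rw [List.foldl_cons, ih, wstep, length_set2]

lemma rowlen_foldl_wstep (L : List (Nat × Nat × Int)) (g : List (List Int)) (r : Nat) :
    ((L.foldl wstep g).getD r []).length = (g.getD r []).length := by
  induction L generalizing g with
  | nil => rfl
  | cons t L ih => rw [List.foldl_cons, ih, wstep, rowlen_set2]

lemma cell_foldl_not_hit (L : List (Nat × Nat × Int)) (g : List (List Int)) (r c : Nat)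
    (h : ∀ t ∈ L, ¬(t.1 = r ∧ t.2.1 = c)) :
    cell (L.foldl wstep g) r c = cell g r c := by
  induction L generalizing g with
  | nil => rfl
  | cons t L ih =>
    rw [List.foldl_cons, ih _ (fun u hu => h u (by simp [hu])), wstep, cell_set2]
    rw [if_neg (fun hcond => h t (by simp) ⟨hcond.1, hcond.2.1⟩)]

lemma cell_foldl_hit (L1 L2 : List (Nat × Nat × Int)) (t : Nat × Nat × Int)
    (g : List (List Int))
    (h2 : ∀ u ∈ L2, ¬(u.1 = t.1 ∧ u.2.1 = t.2.1))
    (hr : t.1 < g.length) (hc : t.2.1 < (g.getD t.1 []).length) :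
    cell ((L1 ++ t :: L2).foldl wstep g) t.1 t.2.1 = t.2.2 := by
  rw [List.foldl_append, List.foldl_cons, cell_foldl_not_hit _ _ _ _ h2, wstep, cell_set2]
  rw [if_pos ⟨rfl, rfl, by rwa [length_foldl_wstep], by rwa [rowlen_foldl_wstep]⟩]

lemma mem_split_last {α} [DecidableEq α] {x : α} {xs : List α} (h : x ∈ xs) :
    ∃ l1 l2, xs = l1 ++ x :: l2 ∧ x ∉ l2 := by
  induction xs using List.reverseRecOn with
  | nil => simp at h
  | append_singleton ys y ih =>
    by_cases hxy : x = y
    · exact ⟨ys, [], by simp [hxy], by simp⟩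
    · have hx : x ∈ ys := by
        rcases List.mem_append.1 h with h' | h'
        · exact h'
        · simp at h'; exact absurd h' hxy
      rcases ih hx with ⟨l1, l2, hsplit, hnot⟩
      exact ⟨l1, l2 ++ [y], by simp [hsplit], by simp [hnot, hxy]⟩

lemma mem_writes {a : List (List Int)} {sc s : Nat} {t : Nat × Nat × Int} :
    t ∈ writes a sc s ↔ ∃ i j x y, i < sc ∧ j < sc ∧ x < s ∧ y < s ∧
      t = (i*s+x, (j*s+y, (a.getD (i*s+x) []).getD ((sc-1-j)*s+y) 0)) := by
  simp only [writes, List.mem_flatMap, List.mem_map, List.mem_range]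
  constructor
  · rintro ⟨i, hi, j, hj, x, hx, y, hy, rfl⟩
    exact ⟨i, j, x, y, hi, hj, hx, hy, rfl⟩
  · rintro ⟨i, j, x, y, hi, hj, hx, hy, rfl⟩
    exact ⟨i, hi, j, hj, x, hx, y, hy, rfl⟩

lemma pos_lt_filled {i x sc s : Nat} (hi : i < sc) (hx : x < s) : i*s+x < sc*s := by
  have h1 : (i+1)*s ≤ sc*s := Nat.mul_le_mul_right _ (by omega)
  have h2 : (i+1)*s = i*s + s := by ring
  omega

lemma divmod_unique {i x s : Nat} (hx : x < s) : (i*s+x)/s = i ∧ (i*s+x)%s = x := by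
  constructor
  · rw [Nat.add_comm, Nat.add_mul_div_right _ _ (by omega : 0 < s),
      Nat.div_eq_of_lt hx, Nat.zero_add]
  · rw [Nat.add_comm, Nat.add_mul_mod_self_right, Nat.mod_eq_of_lt hx]

lemma cell_grid0 (n r c : Nat) : cell (grid0 n) r c = 0 := by
  unfold cell grid0
  simp only [List.getD_eq_getElem?_getD, List.getElem?_replicate]
  split_ifs <;> simp

lemma rowlen_grid0 {n r : Nat} (hr : r < n) : ((grid0 n).getD r []).length = n := by
  simp [grid0, List.getD_eq_getElem?_getD, hr]

lemma cell_result (a : List (List Int)) (sc s : Nat) (hs : 0 < s)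
    (hf : sc*s ≤ a.length) (r c : Nat) :
    cell ((writes a sc s).foldl wstep (grid0 a.length)) r c =
      if r < sc*s ∧ c < sc*s then (a.getD r []).getD ((sc-1-c/s)*s + c%s) 0 else 0 := by
  by_cases hrc : r < sc*s ∧ c < sc*s
  · rw [if_pos hrc]
    obtain ⟨hr, hc⟩ := hrc
    have hi0 : r/s < sc := by rwa [Nat.div_lt_iff_lt_mul hs]
    have hj0 : c/s < sc := by rwa [Nat.div_lt_iff_lt_mul hs]
    have hrdm : (r/s)*s + r%s = r := Nat.div_add_mod' r s
    have hcdm : (c/s)*s + c%s = c := Nat.div_add_mod' c s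
    have ht0mem : (r, (c, (a.getD r []).getD ((sc-1-c/s)*s + c%s) 0)) ∈ writes a sc s := by
      rw [mem_writes]
      refine ⟨r/s, c/s, r%s, c%s, hi0, hj0, Nat.mod_lt _ hs, Nat.mod_lt _ hs, ?_⟩
      rw [hrdm, hcdm]
    obtain ⟨L1, L2, hsplit, hnot⟩ := mem_split_last ht0mem
    have h2 : ∀ u ∈ L2, ¬(u.1 = r ∧ u.2.1 = c) := by
      rintro u hu ⟨hc1, hc2⟩
      apply hnot
      have humem : u ∈ writes a sc s := by rw [hsplit]; simp [hu]
      rw [mem_writes] at humem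
      obtain ⟨i, j, x, y, hi, hj, hx, hy, rfl⟩ := humem
      simp only at hc1 hc2
      have hdx := divmod_unique (i := i) (x := x) hx
      have hdy := divmod_unique (i := j) (x := y) hy
      rw [hc1] at hdx
      rw [hc2] at hdy
      have hieq : i = r/s := by omega
      have hxeq : x = r%s := by omega
      have hjeq : j = c/s := by omega
      have hyeq : y = c%s := by omega
      subst hieq hxeq hjeq hyeq
      rw [hrdm, hcdm] at hu
      exact hu
    have hlen : r < (grid0 a.length).length := by simp [grid0]; omega
    have hrowlen : c < ((grid0 a.length).getD r []).length := by
      rw [rowlen_grid0 (by omega)]; omega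
    rw [hsplit]
    exact cell_foldl_hit L1 L2 (r, (c, (a.getD r []).getD ((sc-1-c/s)*s + c%s) 0))
      (grid0 a.length) h2 hlen hrowlen
  · rw [if_neg hrc]
    rw [cell_foldl_not_hit, cell_grid0]
    rintro t ht ⟨hc1, hc2⟩
    rw [mem_writes] at ht
    obtain ⟨i, j, x, y, hi, hj, hx, hy, rfl⟩ := ht
    simp only at hc1 hc2
    have p1 := pos_lt_filled hi hx
    have p2 := pos_lt_filled hj hy
    omega

lemma cell_eq_getElem (g : List (List Int)) (r c : Nat) (hr : r < g.length)
    (hc : c < g[r].length) : g[r][c] = cell g r c := by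
  rw [cell, List.getD_eq_getElem _ _ hr, List.getD_eq_getElem _ _ hc]

lemma rowlen_FA (a : List (List Int)) (sc s : Nat) (r : Nat) (hr : r < a.length)
    (h : r < ((writes a sc s).foldl wstep (grid0 a.length)).length) :
    ((writes a sc s).foldl wstep (grid0 a.length))[r].length = a.length := by
  rw [← List.getD_eq_getElem _ [] h, rowlen_foldl_wstep, rowlen_grid0 hr]

lemma foldl_eq_bgrid (a : List (List Int)) (sc s : Nat) (hs : 0 < s)
    (hf : sc*s ≤ a.length) :
    (writes a sc s).foldl wstep (grid0 a.length) = bgrid a sc s := by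
  have hlenA : ((writes a sc s).foldl wstep (grid0 a.length)).length = a.length := by
    rw [length_foldl_wstep]; simp [grid0]
  have hlenB : (bgrid a sc s).length = a.length := by
    simp [bgrid]; omega
  apply List.ext_getElem (by rw [hlenA, hlenB])
  intro r h1 h2
  have hrn : r < a.length := by rwa [hlenA] at h1
  by_cases hrf : r < sc*s
  · unfold bgrid
    rw [List.getElem_append_left (by simpa using hrf), List.getElem_map,
      List.getElem_range]
    apply List.ext_getElem (by rw [rowlen_FA a sc s r hrn]; simp; omega)
    intro c hc1 hc2
    have hcn : c < a.length := by rwa [rowlen_FA a sc s r hrn] at hc1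
    rw [cell_eq_getElem _ _ _ h1 hc1, cell_result a sc s hs hf r c]
    by_cases hcf : c < sc*s
    · rw [if_pos ⟨hrf, hcf⟩,
        List.getElem_append_left (by simpa using hcf), List.getElem_map, List.getElem_range]
    · rw [if_neg (by tauto), List.getElem_append_right (by simpa using by omega),
        List.getElem_replicate]
  · unfold bgrid
    rw [List.getElem_append_right (by simpa using by omega), List.getElem_replicate]
    apply List.ext_getElem (by rw [rowlen_FA a sc s r hrn]; simp)
    intro c hc1 hc2
    have hcn : c < a.length := by rwa [rowlen_FA a sc s r hrn] at hc1
    rw [cell_eq_getElem _ _ _ h1 hc1, cell_result a sc s hs hf r c,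
      if_neg (by tauto), List.getElem_replicate]

lemma portA_eq (a : List (List Int)) (l : Int) :
    op6 a l = (writes a (a.length / 2^l.toNat) (2^l.toNat)).foldl wstep (grid0 a.length) := by
  rw [writes, List.foldl_flatMap]
  simp only [op6, grid0, PySem.List.len_eq, Nat.one_shiftLeft, PySem.Int.floordiv_natCast,
    PySem.List.pyRange_zero_nat, List.foldl_map, List.foldl_flatMap]
  apply PySem.List.foldl_congr_mem'
  intro i hi g
  apply PySem.List.foldl_congr_mem'
  intro j hj g
  have hj' : j < a.length / 2^l.toNat := List.mem_range.1 hj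
  apply PySem.List.foldl_congr_mem'
  intro x hx g
  apply PySem.List.foldl_congr_mem'
  intro y hy g
  have hcast1 : (i:Int) * ((2^l.toNat : Nat) : Int) + (x:Int) = ((i * 2^l.toNat + x : Nat) : Int) := by push_cast; ring
  have hcast2 : (j:Int) * ((2^l.toNat : Nat) : Int) + (y:Int) = ((j * 2^l.toNat + y : Nat) : Int) := by push_cast; ring
  have hcast3 : (((a.length / 2^l.toNat : Nat) : Int) - (j:Int) - 1) * ((2^l.toNat : Nat) : Int) + (y:Int)
      = (((a.length / 2^l.toNat - 1 - j) * 2^l.toNat + y : Nat) : Int) := by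
    have he : ((a.length / 2^l.toNat : Nat) : Int) - (j:Int) - 1
        = ((a.length / 2^l.toNat - 1 - j : Nat) : Int) := by omega
    rw [he]
    push_cast
    ring
  rw [hcast1, hcast2, hcast3]
  simp only [PySem.List.pySetD_natCast, PySem.List.pyGetD_natCast]
  rfl

lemma portB_eq (a : List (List Int)) (l : Int) :
    op6_alt a l = bgrid a (a.length / 2^l.toNat) (2^l.toNat) := by
  have hs : 0 < 2^l.toNat := Nat.pow_pos (by omega)
  have hf : (a.length / 2^l.toNat) * 2^l.toNat ≤ a.length := Nat.div_mul_le_self _ _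
  have hmul : ((a.length / 2^l.toNat : Nat) : Int) * ((2^l.toNat : Nat) : Int)
      = (((a.length / 2^l.toNat) * 2^l.toNat : Nat) : Int) := by push_cast; ring
  have hsub : ((a.length : Nat) : Int) - (((a.length / 2^l.toNat) * 2^l.toNat : Nat) : Int)
      = (((a.length - (a.length / 2^l.toNat) * 2^l.toNat) : Nat) : Int) := by omega
  simp only [op6_alt, bgrid, PySem.List.len_eq, Nat.one_shiftLeft, PySem.Int.floordiv_natCast,
    hmul, hsub, Int.toNat_natCast, PySem.List.pyRange_zero_nat, List.map_map]
  congr 1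
  apply List.map_congr_left
  intro r hr
  refine congrArg (· ++ _) ?_
  apply List.map_congr_left
  intro c hc
  have hc' : c < (a.length / 2^l.toNat) * 2^l.toNat := List.mem_range.1 hc
  have hcd : c / 2^l.toNat < a.length / 2^l.toNat := by
    rwa [Nat.div_lt_iff_lt_mul hs]
  simp only [Function.comp]
  have h1 : PySem.Int.floordiv (c : Int) ((2^l.toNat : Nat) : Int) = ((c / 2^l.toNat : Nat) : Int) :=
    PySem.Int.floordiv_natCast _ _
  have h2 : PySem.Int.mod (c : Int) ((2^l.toNat : Nat) : Int) = ((c % 2^l.toNat : Nat) : Int) :=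
    PySem.Int.mod_natCast _ _
  have h3 : (((a.length / 2^l.toNat : Nat) : Int) - 1 - ((c / 2^l.toNat : Nat) : Int)) * ((2^l.toNat : Nat) : Int) + ((c % 2^l.toNat : Nat) : Int)
      = ((((a.length / 2^l.toNat) - 1 - c / 2^l.toNat) * 2^l.toNat + c % 2^l.toNat : Nat) : Int) := by
    have he : ((a.length / 2^l.toNat : Nat) : Int) - 1 - ((c / 2^l.toNat : Nat) : Int)
        = (((a.length / 2^l.toNat) - 1 - c / 2^l.toNat : Nat) : Int) := by omega
    rw [he]
    push_cast
    ring
  rw [h1, h2, h3]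
  simp only [PySem.List.pyGetD_natCast]

lemma ports_agree (a : List (List Int)) (l : Int) : op6 a l = op6_alt a l := by
  rw [portA_eq, portB_eq]
  exact foldl_eq_bgrid a _ _ (Nat.pow_pos (by omega)) (Nat.div_mul_le_self _ _)

-- ===== VERDICT (by name: the statement is the Claim_ definition above) =====
theorem op6_spec : Claim_equal_op6 := by
  intro a l _hdom _hpre
  exact ports_agree a l
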